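-- pv_equiv track=rewrite | github.com/feyza-b-EE/word_puzzle_solver | word_puzzle_solver.py | decompose_command
-- ===== SOURCE A (Python) =====
-- def decompose_command(str1):
--     if ("w" in str1 or "W" in str1) and ("r" in str1 or "R" in str1) and ("c" in str1 or "C" in str1) \
--         and ("d" in str1 or "D" in str1):
--             output1 = 0
--     else:
--        return (-1, None, None, None)
--
--     if output1 == 0:
--
--         output2 = []
--
--         for i, value in enumerate(str1):
--             if (value == "w" or value == "W") and (i+2 < len(str1)) and str1[i+1].isdigit() and str1[i+2].isdigit() :
--                 output2.append(int(str1[i+1] + str1[i+2]))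
--             elif (value == "w" or value == "W") and str1[i+1].isdigit():
--                 output2.append(int(str1[i+1]))
--
--         output2 = output2[0]
--
--         row_no = []
--         for i, value in enumerate(str1):
--             if (value == "R" or value == "r") and (i+2 < len(str1)) and str1[i+1].isdigit() and str1[i+2].isdigit():
--                 row_no.append(int(str1[i+1] + str1[i+2]))
--             elif (value == "R" or value == "r") and str1[i+1].isdigit():
--                 row_no.append(int(str1[i+1]))
--
--         row_no = row_no[0]
--
--         column_no = []
--         for i, value in enumerate(str1):
--             if (value == "C" or value == "c") and (i+2 < len(str1)) and str1[i+1].isdigit() and str1[i+2].isdigit():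
--                 column_no.append(int(str1[i+1] + str1[i+2]))
--             elif (value == "C" or value == "c") and str1[i+1].isdigit():
--                 column_no.append(int(str1[i+1]))
--
--         column_no = column_no[0]
--
--         output3 = [row_no, column_no]
--
--         direction = []
--         for i, value in enumerate(str1):
--             if (value == "d" or value == "D") and (str1[i+1] != "V" and str1[i+1] != "H" and str1[i+1] != "h" and str1[i+1] != "v" ):
--                 direction.append("H")
--             if (value == "d" or value == "D") and (str1[i+1] == "V" or str1[i+1] == "v"):
--                 direction.append("V")
--             if (value == "d" or value == "D") and (str1[i+1] == "H" or str1[i+1] == "h"):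
--                 direction.append("H")
--
--         output4 = direction[0]
--         return (output1, output2, output3, output4)
-- ===== SOURCE B (Python) =====
-- def _first_number(letters, s):
--     # walk the tail: first occurrence of a letter followed by a digit wins
--     while s:
--         if s[0] in letters and s[1:2].isdigit():
--             return int(s[1:3]) if s[2:3].isdigit() else int(s[1:2])
--         s = s[1:]
--     return None
--
--
-- def _first_direction(s):
--     while s:
--         if s[0] in "dD":
--             return "V" if s[1:2] in ("v", "V") else "H"
--         s = s[1:]
--     return None
--
--
-- def decompose_command(str1):
--     if not (("w" in str1 or "W" in str1) and ("r" in str1 or "R" in str1)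
--             and ("c" in str1 or "C" in str1) and ("d" in str1 or "D" in str1)):
--         return (-1, None, None, None)
--     word = _first_number("wW", str1)
--     row = _first_number("rR", str1)
--     col = _first_number("cC", str1)
--     coords = None if row is None or col is None else [row, col]
--     return (0, word, coords, _first_direction(str1))
-- ===== Notes on version B (the rewrite author's own statement) =====
-- stated objective: simpler
-- what changed: A scans the whole string four times collecting every match into a list and then takes element [0]; B walks the tail once per field and returns the first matching occurrence directly (early exit, no intermediate lists).
import Mathlib
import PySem

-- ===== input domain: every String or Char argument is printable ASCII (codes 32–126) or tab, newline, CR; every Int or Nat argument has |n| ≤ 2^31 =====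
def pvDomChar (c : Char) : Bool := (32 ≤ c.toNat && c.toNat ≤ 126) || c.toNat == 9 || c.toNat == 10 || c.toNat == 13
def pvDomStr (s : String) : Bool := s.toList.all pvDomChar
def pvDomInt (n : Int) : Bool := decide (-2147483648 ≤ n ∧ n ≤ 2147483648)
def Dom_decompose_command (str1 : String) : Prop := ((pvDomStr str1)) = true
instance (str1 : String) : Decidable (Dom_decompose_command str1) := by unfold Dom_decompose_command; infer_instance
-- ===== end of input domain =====

-- B replaces A's four collect-every-match-then-take-[0] index loops by early-exit tail-walks that
-- return the first match directly (objective: simpler; return-value equivalence on Pre_).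

-- int(c) for a digit character c
def pvDigVal (c : Char) : Int := (c.toNat : Int) - 48

-- ===== PORT A =====
-- A's three number loops are identical up to the letter pair, so they share one transliteration.
-- str1[i+1] / str1[i+2] are ported as L.getD with a dummy default: Pre_ excludes the inputs where
-- Python's indexing raises IndexError, and the in-condition accesses at i+2 are guarded in A itself.
def pvA_numsAux (a b : Char) (L : List Char) (i : Nat) (rest : List Char) (acc : List Int) : List Int :=
  match rest with
  | [] => acc
  | v :: rs =>
    let acc' :=
      if (v == a || v == b) && decide (i + 2 < L.length) && (L.getD (i+1) ' ').isDigit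
          && (L.getD (i+2) ' ').isDigit then
        acc ++ [10 * pvDigVal (L.getD (i+1) '0') + pvDigVal (L.getD (i+2) '0')]  -- int(str1[i+1] + str1[i+2])
      else if (v == a || v == b) && (L.getD (i+1) ' ').isDigit then
        acc ++ [pvDigVal (L.getD (i+1) '0')]                                     -- int(str1[i+1])
      else acc
    pvA_numsAux a b L (i+1) rs acc'

def pvA_dirsAux (L : List Char) (i : Nat) (rest : List Char) (acc : List String) : List String :=
  match rest with
  | [] => acc
  | v :: rs =>
    let nx := L.getD (i+1) ' '   -- str1[i+1]; IndexError inputs excluded by Pre_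
    let acc1 := if (v == 'd' || v == 'D') && !(nx == 'V') && !(nx == 'H') && !(nx == 'h') && !(nx == 'v')
                then acc ++ ["H"] else acc
    let acc2 := if (v == 'd' || v == 'D') && (nx == 'V' || nx == 'v') then acc1 ++ ["V"] else acc1
    let acc3 := if (v == 'd' || v == 'D') && (nx == 'H' || nx == 'h') then acc2 ++ ["H"] else acc2
    pvA_dirsAux L (i+1) rs acc3

-- '"w" in str1' for a one-character needle is character membership
def decompose_command (str1 : String) : Int × Option Int × Option (List Int) × Option String :=
  let L := str1.toList
  if (L.contains 'w' || L.contains 'W') && (L.contains 'r' || L.contains 'R') &&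
     (L.contains 'c' || L.contains 'C') && (L.contains 'd' || L.contains 'D') then
    -- the [0] of each collected list; list-empty IndexError inputs excluded by Pre_
    let output2 := (pvA_numsAux 'w' 'W' L 0 L []).head?
    let row_no  := (pvA_numsAux 'r' 'R' L 0 L []).head?
    let col_no  := (pvA_numsAux 'c' 'C' L 0 L []).head?
    let dir     := (pvA_dirsAux L 0 L []).head?
    (0, output2,
     (match row_no, col_no with | some r, some c => some [r, c] | _, _ => none),
     dir)
  else (-1, none, none, none)

-- ===== PORT B =====
-- _first_number: s[1:2] → s.headD, s[2:3] → s.tail.headD (''.isdigit() is False, matched by ' ')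
def pvB_num (a b : Char) : List Char → Option Int
  | [] => none
  | ch :: s =>
    if (ch == a || ch == b) && (s.headD ' ').isDigit then
      if (s.tail.headD ' ').isDigit then
        some (10 * pvDigVal (s.headD '0') + pvDigVal (s.tail.headD '0'))         -- int(s[1:3])
      else some (pvDigVal (s.headD '0'))                                          -- int(s[1:2])
    else pvB_num a b s

def pvB_dir : List Char → Option String
  | [] => none
  | ch :: s =>
    if ch == 'd' || ch == 'D' then
      some (if s.headD ' ' == 'v' || s.headD ' ' == 'V' then "V" else "H")
    else pvB_dir s

def decompose_command_alt (str1 : String) : Int × Option Int × Option (List Int) × Option String :=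
  let L := str1.toList
  if (L.contains 'w' || L.contains 'W') && (L.contains 'r' || L.contains 'R') &&
     (L.contains 'c' || L.contains 'C') && (L.contains 'd' || L.contains 'D') then
    let word := pvB_num 'w' 'W' L
    let row  := pvB_num 'r' 'R' L
    let col  := pvB_num 'c' 'C' L
    -- coords = None if row is None or col is None else [row, col]
    let coords := match row with
      | none => none
      | some r => match col with
        | none => none
        | some c => some [r, c]
    (0, word, coords, pvB_dir L)
  else (-1, none, none, none)

-- ===== PRECONDITION & SPEC =====
def pvLetter (c : Char) : Bool :=
  c == 'w' || c == 'W' || c == 'r' || c == 'R' || c == 'c' || c == 'C' || c == 'd' || c == 'D'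

def pvHasPair (a b : Char) (L : List Char) : Bool :=
  (L.zip L.tail).any fun p => (p.1 == a || p.1 == b) && p.2.isDigit

-- Pre_ holds exactly where Python A returns: when all of w/r/c/d occur (either case), A raises
-- IndexError unless no command letter sits at the last position and each of w/r/c has some
-- occurrence immediately followed by a digit (else a lookup past the end or a [0] on an empty
-- list fires); when some letter is missing A returns (-1, None, None, None) and Pre_ holds.
def Pre_decompose_command (str1 : String) : Prop :=
  ((str1.toList.contains 'w' || str1.toList.contains 'W') &&
   (str1.toList.contains 'r' || str1.toList.contains 'R') &&
   (str1.toList.contains 'c' || str1.toList.contains 'C') &&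
   (str1.toList.contains 'd' || str1.toList.contains 'D')) = true →
  ((str1.toList.getLast?.all fun c => !pvLetter c) = true ∧
   pvHasPair 'w' 'W' str1.toList = true ∧
   pvHasPair 'r' 'R' str1.toList = true ∧
   pvHasPair 'c' 'C' str1.toList = true)

instance (str1 : String) : Decidable (Pre_decompose_command str1) := by
  unfold Pre_decompose_command; infer_instance

def pvWitness_decompose_command : String := "w1r2c3dh"

def Spec_decompose_command (str1 : String) (out : Int × Option Int × Option (List Int) × Option String) : Prop :=
  out = decompose_command_alt str1

instance (str1 : String) (out : Int × Option Int × Option (List Int) × Option String) :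
    Decidable (Spec_decompose_command str1 out) := by
  unfold Spec_decompose_command; infer_instance

-- ===== CLAIM (what is proved, stated in full; the proofs are below) =====
def Claim_equal_decompose_command : Prop :=
  ∀ (str1 : String), Dom_decompose_command str1 → Pre_decompose_command str1 →
    Spec_decompose_command str1 (decompose_command str1)

-- ===== LEMMAS AND PROOFS =====

theorem pv_getD_eq_headD_drop (l : List Char) (n : Nat) (d : Char) :
    l.getD n d = (l.drop n).headD d := by
  induction l generalizing n with
  | nil => simp
  | cons x xs ih => cases n with
    | zero => simp
    | succ m => exact ih m

theorem pvA_numsAux_append (a b : Char) (L : List Char) :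
    ∀ (rest : List Char) (i : Nat) (acc : List Int),
      pvA_numsAux a b L i rest acc = acc ++ pvA_numsAux a b L i rest [] := by
  intro rest
  induction rest with
  | nil => intro i acc; simp [pvA_numsAux]
  | cons v rs ih =>
    intro i acc
    simp only [pvA_numsAux]
    split_ifs <;> (conv_rhs => rw [ih]) <;> (conv_lhs => rw [ih]) <;> simp

theorem pvA_dirsAux_append (L : List Char) :
    ∀ (rest : List Char) (i : Nat) (acc : List String),
      pvA_dirsAux L i rest acc = acc ++ pvA_dirsAux L i rest [] := by
  intro rest
  induction rest with
  | nil => intro i acc; simp [pvA_dirsAux]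
  | cons v rs ih =>
    intro i acc
    simp only [pvA_dirsAux]
    split_ifs <;> (conv_rhs => rw [ih]) <;> (conv_lhs => rw [ih]) <;> simp

theorem pvA_nums_head (a b : Char) (L : List Char) :
    ∀ (rest : List Char) (i : Nat), L.drop i = rest →
      (pvA_numsAux a b L i rest []).head? = pvB_num a b rest := by
  intro rest
  induction rest with
  | nil => intro i _; simp [pvA_numsAux, pvB_num]
  | cons v rs ih =>
    intro i h
    have hlt : i < L.length := by
      by_contra hle
      have : L.drop i = [] := List.drop_eq_nil_of_le (by omega)
      simp [this] at h
    have hdrop1 : L.drop (i+1) = rs := by rw [← List.tail_drop, h]; rfl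
    have hdrop2 : L.drop (i+2) = rs.tail := by
      rw [show i + 2 = (i+1) + 1 by ring, ← List.tail_drop, hdrop1]
    have hlen : L.length = i + 1 + rs.length := by
      have h' := congrArg List.length h
      rw [List.length_drop] at h'
      simp at h'
      omega
    have hrec : (pvA_numsAux a b L (i+1) rs []).head? = pvB_num a b rs := ih _ hdrop1
    have hg1 : ∀ d, L.getD (i+1) d = rs.headD d := by
      intro d; rw [pv_getD_eq_headD_drop, hdrop1]
    have hg2 : ∀ d, L.getD (i+2) d = rs.tail.headD d := by
      intro d; rw [pv_getD_eq_headD_drop, hdrop2]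
    simp only [pvA_numsAux]
    rw [pvA_numsAux_append]
    simp only [hg1, hg2]
    rcases rs with _ | ⟨d1, rs2⟩
    · have hf : decide (i + 2 < L.length) = false := by
        simp only [hlen]; simp
      by_cases hv : (v == a || v == b) = true <;>
        simp [pvB_num, hv, hf, hrec, show (' ').isDigit = false from rfl]
    · rcases rs2 with _ | ⟨d2, rs3⟩
      · have hf : decide (i + 2 < L.length) = false := by
          simp only [hlen]; simp
        by_cases hv : (v == a || v == b) = true <;>
          by_cases h1 : d1.isDigit = true <;>
            simp [pvB_num, hv, hf, h1, hrec, show (' ').isDigit = false from rfl]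
      · have hlen' : (d1 :: d2 :: rs3).length = rs3.length + 2 := by simp
        have ht : decide (i + 2 < L.length) = true := by
          apply decide_eq_true; omega
        by_cases hv : (v == a || v == b) = true <;>
          by_cases h1 : d1.isDigit = true <;>
            by_cases h2 : d2.isDigit = true <;>
              simp [pvB_num, hv, ht, h1, h2, hrec]

theorem pvA_dirs_head (L : List Char) :
    ∀ (rest : List Char) (i : Nat), L.drop i = rest →
      (pvA_dirsAux L i rest []).head? = pvB_dir rest := by
  intro rest
  induction rest with
  | nil => intro i _; simp [pvA_dirsAux, pvB_dir]
  | cons v rs ih =>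
    intro i h
    have hdrop1 : L.drop (i+1) = rs := by rw [← List.tail_drop, h]; rfl
    have hrec : (pvA_dirsAux L (i+1) rs []).head? = pvB_dir rs := ih _ hdrop1
    have hg1 : L.getD (i+1) ' ' = rs.headD ' ' := by
      rw [pv_getD_eq_headD_drop, hdrop1]
    simp only [pvA_dirsAux, hg1]
    rw [pvA_dirsAux_append]
    by_cases hv : (v == 'd' || v == 'D') = true
    · by_cases e1 : rs.head?.getD ' ' = 'v'
      · simp [pvB_dir, hv, e1]
      · by_cases e2 : rs.head?.getD ' ' = 'V'
        · simp [pvB_dir, hv, e2]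
        · by_cases e3 : rs.head?.getD ' ' = 'H'
          · simp [pvB_dir, hv, e3]
          · by_cases e4 : rs.head?.getD ' ' = 'h'
            · simp [pvB_dir, hv, e4]
            · simp [pvB_dir, hv, e1, e2, e3, e4]
    · simp only [Bool.or_eq_true, not_or, Bool.not_eq_true] at hv
      simp [pvB_dir, hv.1, hv.2, hrec]

-- ===== VERDICT (by name: the statement is the Claim_ definition above) =====
theorem decompose_command_spec : Claim_equal_decompose_command := by
  intro str1 _ _
  unfold Spec_decompose_command decompose_command decompose_command_alt
  by_cases hg : ((str1.toList.contains 'w' || str1.toList.contains 'W') &&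
      (str1.toList.contains 'r' || str1.toList.contains 'R') &&
      (str1.toList.contains 'c' || str1.toList.contains 'C') &&
      (str1.toList.contains 'd' || str1.toList.contains 'D')) = true
  · simp only [hg, if_true]
    rw [pvA_nums_head 'w' 'W' str1.toList str1.toList 0 rfl,
        pvA_nums_head 'r' 'R' str1.toList str1.toList 0 rfl,
        pvA_nums_head 'c' 'C' str1.toList str1.toList 0 rfl,
        pvA_dirs_head str1.toList str1.toList 0 rfl]
    cases pvB_num 'r' 'R' str1.toList <;> cases pvB_num 'c' 'C' str1.toList <;> rfl
  · rw [if_neg hg, if_neg hg]
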